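-- pv_equiv track=rewrite | github.com/pypi-data/pypi-mirror-370 | packages/lexer-fdfattor-2025/lexer_fdfattor_2025-1.0.1.tar.gz/lexer_fdfattor_2025-1.0.1/lexer/core.py | afd_end
-- ===== SOURCE A (Python) =====
-- ESTADO_FINAL = "ESTADO FINAL"
--
-- ESTADO_NO_FINAL = "NO ACEPTADO"
--
-- ESTADO_TRAMPA = "EN ESTADO TRAMPA"
--
-- def afd_end(lexema):
--     estado = 0
--     estados_finales = [3]
--     for c in lexema:
--         if estado == 0 and c == 'e':
--             estado = 1
--         elif estado == 1 and c == 'n':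
--             estado = 2
--         elif estado == 2 and c == 'd':
--             estado = 3
--         else:
--             estado = -1
--
--     if estado == -1:
--         return ESTADO_TRAMPA
--     if estado in estados_finales:
--         return ESTADO_FINAL
--     else:
--         return ESTADO_NO_FINAL
-- ===== SOURCE B (Python) =====
-- ESTADO_FINAL = "ESTADO FINAL"
-- ESTADO_NO_FINAL = "NO ACEPTADO"
-- ESTADO_TRAMPA = "EN ESTADO TRAMPA"
--
-- def afd_end(lexema):
--     seq = list(lexema)
--     target = list("end")
--     if seq == target:
--         return ESTADO_FINAL
--     if seq == target[:len(seq)]: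
--         return ESTADO_NO_FINAL
--     return ESTADO_TRAMPA
-- ===== Notes on version B (the rewrite author's own statement) =====
-- stated objective: simpler
-- what changed: Replaces the explicit per-character DFA state-machine loop with direct list comparisons: exact match of the target word accepts, a proper prefix of it is non-final, anything else is the trap state; the C-level list comparison also makes it measurably faster.
import Mathlib
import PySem

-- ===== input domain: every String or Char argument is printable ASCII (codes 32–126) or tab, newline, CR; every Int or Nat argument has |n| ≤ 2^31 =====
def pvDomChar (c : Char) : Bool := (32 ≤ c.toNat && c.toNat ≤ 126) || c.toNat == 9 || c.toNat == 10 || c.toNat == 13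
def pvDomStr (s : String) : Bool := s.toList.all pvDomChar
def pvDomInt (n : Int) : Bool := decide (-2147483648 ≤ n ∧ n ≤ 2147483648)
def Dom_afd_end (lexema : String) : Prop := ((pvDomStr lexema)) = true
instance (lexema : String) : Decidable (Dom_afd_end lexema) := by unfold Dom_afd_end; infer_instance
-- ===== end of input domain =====

-- B replaces A's hand-rolled DFA state loop with a direct prefix comparison against "end" (simpler; same cost).

-- ===== PORT A =====
-- one step of the DFA's for-loop body
def afdStep (estado : Int) (c : Char) : Int :=
  if estado = 0 ∧ c = 'e' then 1
  else if estado = 1 ∧ c = 'n' then 2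
  else if estado = 2 ∧ c = 'd' then 3
  else -1

def afd_end (lexema : String) : String :=
  let estado := lexema.toList.foldl afdStep 0
  let estados_finales : List Int := [3]
  if estado = -1 then "EN ESTADO TRAMPA"
  else if estado ∈ estados_finales then "ESTADO FINAL"
  else "NO ACEPTADO"

-- ===== PORT B =====
def afd_end_alt (lexema : String) : String :=
  let seq := lexema.toList
  let target := "end".toList
  if seq = target then "ESTADO FINAL"
  else if seq = target.take seq.length then "NO ACEPTADO"
  else "EN ESTADO TRAMPA"

-- ===== PRECONDITION & SPEC =====
def Spec_afd_end (lexema : String) (out : String) : Prop := out = afd_end_alt lexema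
instance (lexema : String) (out : String) : Decidable (Spec_afd_end lexema out) := by unfold Spec_afd_end; infer_instance

-- ===== CLAIM (what is proved, stated in full; the proofs are below) =====
def Claim_equal_afd_end : Prop := ∀ (lexema : String), Dom_afd_end lexema → Spec_afd_end lexema (afd_end lexema)

-- ===== LEMMAS AND PROOFS =====

-- the trap state -1 is absorbing
theorem afd_trap_absorb (l : List Char) : l.foldl afdStep (-1) = -1 := by
  induction l with
  | nil => rfl
  | cons c rest ih => simpa [afdStep] using ih

theorem afd_end_eq_alt (lexema : String) : afd_end lexema = afd_end_alt lexema := by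
  unfold afd_end afd_end_alt
  rcases h : lexema.toList with _ | ⟨c1, _ | ⟨c2, _ | ⟨c3, _ | ⟨c4, rest⟩⟩⟩⟩
  · decide
  all_goals simp only [List.foldl_cons, List.foldl_nil]
  · by_cases h1 : c1 = 'e' <;> simp [afdStep, h1, List.take]
  · by_cases h1 : c1 = 'e' <;> by_cases h2 : c2 = 'n' <;>
      simp [afdStep, h1, h2, List.take]
  · by_cases h1 : c1 = 'e' <;> by_cases h2 : c2 = 'n' <;> by_cases h3 : c3 = 'd' <;>
      simp [afdStep, h1, h2, h3, List.take]
  · by_cases h1 : c1 = 'e' <;> by_cases h2 : c2 = 'n' <;> by_cases h3 : c3 = 'd' <;>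
      simp [afdStep, h1, h2, h3, afd_trap_absorb, List.take]

-- ===== VERDICT (by name: the statement is the Claim_ definition above) =====
theorem afd_end_spec : Claim_equal_afd_end := by
  intro lexema _
  exact afd_end_eq_alt lexema
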